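-- pv_equiv track=rewrite | github.com/fabriqaai/specsmd | scripts/tweet_changelog.py | text_to_unicode_bold
-- ===== SOURCE A (Python) =====
-- def text_to_unicode_bold(text):
--     """Convert text to Unicode bold characters."""
--     bold_map = {}
--     for i, char in enumerate('ABCDEFGHIJKLMNOPQRSTUVWXYZ'):
--         bold_map[char] = chr(0x1D5D4 + i)
--     for i, char in enumerate('abcdefghijklmnopqrstuvwxyz'):
--         bold_map[char] = chr(0x1D5EE + i)
--     for i, char in enumerate('0123456789'):
--         bold_map[char] = chr(0x1D7EC + i)
--     return ''.join(bold_map.get(c, c) for c in text)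
-- ===== SOURCE B (Python) =====
-- def text_to_unicode_bold(text):
--     """Convert text to Unicode bold characters."""
--     def bold(c):
--         if 'A' <= c <= 'Z':
--             return chr(0x1D5D4 + ord(c) - ord('A'))
--         if 'a' <= c <= 'z':
--             return chr(0x1D5EE + ord(c) - ord('a'))
--         if '0' <= c <= '9':
--             return chr(0x1D7EC + ord(c) - ord('0'))
--         return c
--     return ''.join(bold(c) for c in text)
-- ===== Notes on version B (the rewrite author's own statement) =====
-- stated objective: simpler
-- what changed: Replaces the 62-entry dict built by three enumerate loops with closed-form codepoint arithmetic (range check + offset) per character.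
import Mathlib
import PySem

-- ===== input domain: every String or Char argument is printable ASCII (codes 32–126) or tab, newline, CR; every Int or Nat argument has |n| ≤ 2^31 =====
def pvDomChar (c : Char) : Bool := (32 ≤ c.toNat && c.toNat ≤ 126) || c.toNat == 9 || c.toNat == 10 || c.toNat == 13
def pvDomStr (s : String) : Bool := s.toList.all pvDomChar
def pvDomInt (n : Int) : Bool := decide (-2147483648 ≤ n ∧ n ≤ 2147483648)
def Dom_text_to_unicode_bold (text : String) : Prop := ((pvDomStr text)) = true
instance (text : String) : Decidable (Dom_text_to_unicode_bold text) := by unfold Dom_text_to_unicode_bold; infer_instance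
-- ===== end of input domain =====

set_option maxRecDepth 100000


-- B replaces A's 62-entry lookup table (built by three enumerate loops) with closed-form
-- codepoint arithmetic per character; objective: simpler.

-- ===== PORT A =====
def text_to_unicode_bold (text : String) : String :=
  let bold_map : PySem.Dict Char Char := PySem.Dict.empty
  let bold_map := (PySem.List.enumerate "ABCDEFGHIJKLMNOPQRSTUVWXYZ".toList).foldl
    (fun d p => d.insert p.2 (Char.ofNat (0x1D5D4 + p.1.toNat))) bold_map
  let bold_map := (PySem.List.enumerate "abcdefghijklmnopqrstuvwxyz".toList).foldl
    (fun d p => d.insert p.2 (Char.ofNat (0x1D5EE + p.1.toNat))) bold_map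
  let bold_map := (PySem.List.enumerate "0123456789".toList).foldl
    (fun d p => d.insert p.2 (Char.ofNat (0x1D7EC + p.1.toNat))) bold_map
  String.ofList (text.toList.map (fun c => bold_map.getD c c))

-- ===== PORT B =====
def pvBoldChar (c : Char) : Char :=
  if 'A' ≤ c ∧ c ≤ 'Z' then Char.ofNat (0x1D5D4 + c.toNat - 'A'.toNat)
  else if 'a' ≤ c ∧ c ≤ 'z' then Char.ofNat (0x1D5EE + c.toNat - 'a'.toNat)
  else if '0' ≤ c ∧ c ≤ '9' then Char.ofNat (0x1D7EC + c.toNat - '0'.toNat)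
  else c

def text_to_unicode_bold_alt (text : String) : String :=
  String.ofList (text.toList.map pvBoldChar)

-- ===== PRECONDITION & SPEC =====
def Spec_text_to_unicode_bold (text : String) (out : String) : Prop := out = text_to_unicode_bold_alt text
instance (text : String) (out : String) : Decidable (Spec_text_to_unicode_bold text out) := by unfold Spec_text_to_unicode_bold; infer_instance

-- ===== CLAIM (what is proved, stated in full; the proofs are below) =====
def Claim_equal_text_to_unicode_bold : Prop := ∀ (text : String), Dom_text_to_unicode_bold text → Spec_text_to_unicode_bold text (text_to_unicode_bold text)

-- ===== LEMMAS AND PROOFS =====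

-- the fully built table of port A, as a closed term
def pvAMap : PySem.Dict Char Char :=
  let m : PySem.Dict Char Char := PySem.Dict.empty
  let m := (PySem.List.enumerate "ABCDEFGHIJKLMNOPQRSTUVWXYZ".toList).foldl
    (fun d p => d.insert p.2 (Char.ofNat (0x1D5D4 + p.1.toNat))) m
  let m := (PySem.List.enumerate "abcdefghijklmnopqrstuvwxyz".toList).foldl
    (fun d p => d.insert p.2 (Char.ofNat (0x1D5EE + p.1.toNat))) m
  (PySem.List.enumerate "0123456789".toList).foldl
    (fun d p => d.insert p.2 (Char.ofNat (0x1D7EC + p.1.toNat))) m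

lemma charLt128_of_dom (c : Char) (h : pvDomChar c = true) : c.toNat < 128 := by
  simp [pvDomChar] at h
  omega

lemma pvAll128 : (List.range 128).all
    (fun n => !pvDomChar (Char.ofNat n) ||
      (pvAMap.getD (Char.ofNat n) (Char.ofNat n) == pvBoldChar (Char.ofNat n))) = true := by
  decide

lemma pvChar_key (c : Char) (h : pvDomChar c = true) :
    pvAMap.getD c c = pvBoldChar c := by
  have hlt := charLt128_of_dom c h
  have := List.all_eq_true.mp pvAll128 c.toNat (List.mem_range.mpr hlt)
  have hc : Char.ofNat c.toNat = c := Char.ofNat_toNat c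
  rw [hc] at this
  simp [h] at this
  exact this

-- ===== VERDICT (by name: the statement is the Claim_ definition above) =====
theorem text_to_unicode_bold_spec : Claim_equal_text_to_unicode_bold := by
  intro text hdom
  unfold Spec_text_to_unicode_bold text_to_unicode_bold text_to_unicode_bold_alt
  have hmap : ∀ c ∈ text.toList, pvAMap.getD c c = pvBoldChar c := by
    intro c hc
    exact pvChar_key c (List.all_eq_true.mp hdom c hc)
  show String.ofList (text.toList.map (fun c => pvAMap.getD c c)) = String.ofList (text.toList.map pvBoldChar)
  congr 1
  exact List.map_congr_left hmap
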